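-- pv_equiv track=rewrite | github.com/emeebritto/first-nx | tests/answering_question.py | full_answer
-- ===== SOURCE A (Python) =====
-- def full_answer(question, context, base):
-- 	context = context.split(".")
-- 	count = 0
-- 	for part in context:
-- 		count += len(part)
-- 		if count >= base["start"]:
-- 			return part
-- 	return None
-- ===== SOURCE B (Python) =====
-- def full_answer(question, context, base):
--     parts = context.split(".")
--     cums = []
--     total = 0
--     for p in parts:
--         total += len(p)
--         cums.append(total)
--     start = base["start"]
--     lo, hi = 0, len(parts)
--     while lo < hi:
--         mid = (lo + hi) // 2
--         if cums[mid] < start: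
--             lo = mid + 1
--         else:
--             hi = mid
--     if lo < len(parts):
--         return parts[lo]
--     return None
-- ===== Notes on version B (the rewrite author's own statement) =====
-- stated objective: alternative
-- what changed: Replaces the accumulate-and-early-return linear scan with a prefix-sum table plus a hand-written bisect_left binary search on it.
import Mathlib
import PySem

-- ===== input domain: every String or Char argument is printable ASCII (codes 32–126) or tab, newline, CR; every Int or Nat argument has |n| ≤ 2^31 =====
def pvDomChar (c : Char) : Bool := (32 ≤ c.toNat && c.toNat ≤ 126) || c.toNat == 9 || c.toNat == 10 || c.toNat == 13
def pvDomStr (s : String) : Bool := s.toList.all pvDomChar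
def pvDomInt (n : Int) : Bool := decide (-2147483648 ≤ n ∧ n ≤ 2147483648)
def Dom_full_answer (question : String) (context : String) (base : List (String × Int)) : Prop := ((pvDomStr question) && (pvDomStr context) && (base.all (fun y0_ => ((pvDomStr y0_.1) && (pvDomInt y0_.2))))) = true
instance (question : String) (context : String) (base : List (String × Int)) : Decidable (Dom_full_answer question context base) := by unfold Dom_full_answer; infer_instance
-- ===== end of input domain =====

-- B replaces A's accumulate-and-early-return scan by a prefix-sum table plus a
-- hand-written bisect_left binary search (alternative decomposition, same result).

-- ===== PORT A =====
-- A's for-loop with the running count and early return.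
def fullAnswerLoopA (start : Int) : List String → Int → Option String
  | [], _ => none
  | p :: rest, count =>
    let count' := count + (PySem.Str.len p : Int)
    if start ≤ count' then some p else fullAnswerLoopA start rest count'

def full_answer (question : String) (context : String) (base : List (String × Int)) : Option String :=
  let parts := (PySem.Str.split? context ".").getD []   -- sep "." ≠ "", so split? is always `some`
  match (PySem.Dict.ofList base).get? "start" with
  | none => none   -- Python raises KeyError here; excluded by Pre_
  | some start => fullAnswerLoopA start parts 0

-- ===== PORT B =====
-- B's while-loop binary search (hand-written bisect_left on the prefix-sum table).
-- fuel = hi - lo bounds the iterations of Python's while-loop (structural recursion)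
def bsearchGo (cums : List Int) (start : Int) : Nat → Nat → Nat → Nat
  | 0, lo, _ => lo
  | fuel + 1, lo, hi =>
    if lo < hi then
      let mid := (lo + hi) / 2
      if cums.getD mid 0 < start then bsearchGo cums start fuel (mid + 1) hi
      else bsearchGo cums start fuel lo mid
    else lo

def bsearchB (cums : List Int) (start : Int) (lo hi : Nat) : Nat :=
  bsearchGo cums start (hi - lo) lo hi

-- B's first loop: the prefix-sum table `cums` (the pair carries `total`)
def cumsB (parts : List String) : List Int :=
  (parts.foldl
    (fun (acc : List Int × Int) p =>
      (acc.1 ++ [acc.2 + (PySem.Str.len p : Int)], acc.2 + (PySem.Str.len p : Int)))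
    ([], 0)).1

def full_answer_alt (question : String) (context : String) (base : List (String × Int)) : Option String :=
  let parts := (PySem.Str.split? context ".").getD []   -- sep "." ≠ "", so split? is always `some`
  let cums := cumsB parts
  match (PySem.Dict.ofList base).get? "start" with
  | none => none   -- Python raises KeyError here; excluded by Pre_
  | some start =>
    let lo := bsearchB cums start 0 parts.length
    if lo < parts.length then parts[lo]? else none

-- ===== PRECONDITION & SPEC =====
-- Pre_ excludes exactly the inputs where Python A (and B) raise KeyError: a base dict without key "start".
def Pre_full_answer (question : String) (context : String) (base : List (String × Int)) : Prop :=
  (PySem.Dict.ofList base).contains "start" = true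
instance (question : String) (context : String) (base : List (String × Int)) : Decidable (Pre_full_answer question context base) := by unfold Pre_full_answer; infer_instance

def pvWitness_full_answer : String × String × (List (String × Int)) := ("q", "ab.cd", [("start", 3)])

def Spec_full_answer (question : String) (context : String) (base : List (String × Int)) (out : Option String) : Prop := out = full_answer_alt question context base
instance (question : String) (context : String) (base : List (String × Int)) (out : Option String) : Decidable (Spec_full_answer question context base out) := by unfold Spec_full_answer; infer_instance

-- ===== CLAIM (what is proved, stated in full; the proofs are below) =====
def Claim_equal_full_answer : Prop := ∀ (question : String) (context : String) (base : List (String × Int)), Dom_full_answer question context base → Pre_full_answer question context base → Spec_full_answer question context base (full_answer question context base)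

-- ===== LEMMAS AND PROOFS =====

-- prefix sums of the parts' lengths, started from c (proof-side view of B's foldl)
def cumsFrom (c : Int) : List String → List Int
  | [] => []
  | p :: rest => (c + (PySem.Str.len p : Int)) :: cumsFrom (c + (PySem.Str.len p : Int)) rest

theorem foldl_cums (parts : List String) : ∀ (acc : List Int) (c : Int),
    (parts.foldl
      (fun (acc : List Int × Int) p =>
        (acc.1 ++ [acc.2 + (PySem.Str.len p : Int)], acc.2 + (PySem.Str.len p : Int)))
      (acc, c)).1 = acc ++ cumsFrom c parts := by
  induction parts with
  | nil => intro acc c; simp [cumsFrom]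
  | cons p rest ih =>
    intro acc c
    simp only [List.foldl_cons, cumsFrom]
    rw [ih]
    simp

theorem cumsB_eq (parts : List String) : cumsB parts = cumsFrom 0 parts := by
  have := foldl_cums parts [] 0
  simpa [cumsB] using this

theorem length_cumsFrom (parts : List String) : ∀ c, (cumsFrom c parts).length = parts.length := by
  induction parts with
  | nil => intro c; rfl
  | cons p rest ih => intro c; simp [cumsFrom, ih]

theorem le_cumsFrom (parts : List String) : ∀ c x, x ∈ cumsFrom c parts → c ≤ x := by
  induction parts with
  | nil => intro c x h; simp [cumsFrom] at h
  | cons p rest ih =>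
    intro c x h
    simp only [cumsFrom, List.mem_cons] at h
    have hp : (0 : Int) ≤ (PySem.Str.len p : Int) := Int.natCast_nonneg _
    rcases h with h | h
    · omega
    · have := ih _ _ h; omega

theorem pairwise_cumsFrom (parts : List String) : ∀ c, List.Pairwise (· ≤ ·) (cumsFrom c parts) := by
  induction parts with
  | nil => intro c; simp [cumsFrom]
  | cons p rest ih =>
    intro c
    simp only [cumsFrom, List.pairwise_cons]
    exact ⟨fun x hx => le_cumsFrom _ _ _ hx, ih _⟩

theorem mono_of_pairwise (vs : List Int) (h : List.Pairwise (· ≤ ·) vs) :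
    ∀ i j, i ≤ j → j < vs.length → vs.getD i 0 ≤ vs.getD j 0 := by
  intro i j hij hj
  rcases Nat.eq_or_lt_of_le hij with rfl | hlt
  · exact le_refl _
  · have hi : i < vs.length := Nat.lt_trans hlt hj
    rw [List.getD_eq_getElem _ _ hi, List.getD_eq_getElem _ _ hj]
    exact List.pairwise_iff_getElem.mp h i j hi hj hlt

-- first part whose prefix sum reaches start (common reference shape of both results)
def findPart (start : Int) : List String → List Int → Option String
  | p :: ps, v :: vs => if start ≤ v then some p else findPart start ps vs
  | _, _ => none

theorem loopA_char (start : Int) (parts : List String) : ∀ c,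
    fullAnswerLoopA start parts c = findPart start parts (cumsFrom c parts) := by
  induction parts with
  | nil => intro c; rfl
  | cons p rest ih =>
    intro c
    simp only [fullAnswerLoopA, cumsFrom, findPart, ih]

theorem findPart_eq (start : Int) (parts : List String) : ∀ (vs : List Int) (r : Nat),
    parts.length = vs.length →
    (∀ j, j < r → vs.getD j 0 < start) →
    (r < vs.length → start ≤ vs.getD r 0) →
    findPart start parts vs = if r < parts.length then parts[r]? else none := by
  induction parts with
  | nil =>
    intro vs r _ _ _
    simp [findPart]
  | cons p ps ih =>
    intro vs r hlen hlow hhigh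
    cases vs with
    | nil => simp at hlen
    | cons v vs' =>
      simp only [List.length_cons] at hlen
      by_cases hv : start ≤ v
      · have hr : r = 0 := by
          by_contra h
          have := hlow 0 (Nat.pos_of_ne_zero h)
          simp [List.getD] at this
          omega
        subst hr
        simp [findPart, hv]
      · cases r with
        | zero =>
          exfalso
          have := hhigh (by simp)
          simp [List.getD] at this
          omega
        | succ r' =>
          have hlow' : ∀ j, j < r' → vs'.getD j 0 < start := by
            intro j hj
            have := hlow (j + 1) (by omega)
            simpa using this
          have hhigh' : r' < vs'.length → start ≤ vs'.getD r' 0 := by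
            intro h
            have := hhigh (by simp; omega)
            simpa using this
          have := ih vs' r' (by omega) hlow' hhigh'
          simp only [findPart, if_neg hv, this, List.length_cons,
            List.getElem?_cons_succ, Nat.succ_lt_succ_iff]

theorem bsearchGo_spec (cums : List Int) (start : Int)
    (hmono : ∀ i j, i ≤ j → j < cums.length → cums.getD i 0 ≤ cums.getD j 0) :
    ∀ (fuel lo hi : Nat), hi - lo ≤ fuel → lo ≤ hi → hi ≤ cums.length →
    (∀ j, j < lo → cums.getD j 0 < start) →
    (∀ j, hi ≤ j → j < cums.length → start ≤ cums.getD j 0) →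
    (∀ j, j < bsearchGo cums start fuel lo hi → cums.getD j 0 < start) ∧
      bsearchGo cums start fuel lo hi ≤ cums.length ∧
      (bsearchGo cums start fuel lo hi < cums.length → start ≤ cums.getD (bsearchGo cums start fuel lo hi) 0) := by
  intro fuel
  induction fuel with
  | zero =>
    intro lo hi hfuel hle hhi hlow hhigh
    have : lo = hi := by omega
    subst this
    exact ⟨hlow, hhi, fun h => hhigh lo (le_refl _) h⟩
  | succ fuel ih =>
    intro lo hi hfuel hle hhi hlow hhigh
    simp only [bsearchGo]
    by_cases hlt : lo < hi
    · rw [if_pos hlt]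
      by_cases hmid : cums.getD ((lo + hi) / 2) 0 < start
      · rw [if_pos hmid]
        refine ih ((lo + hi) / 2 + 1) hi (by omega) (by omega) hhi ?_ hhigh
        intro j hj
        have hmidlen : (lo + hi) / 2 < cums.length := by omega
        calc cums.getD j 0 ≤ cums.getD ((lo + hi) / 2) 0 := hmono j _ (by omega) hmidlen
          _ < start := hmid
      · rw [if_neg hmid]
        refine ih lo ((lo + hi) / 2) (by omega) (by omega) (by omega) hlow ?_
        intro j hj hjlen
        calc start ≤ cums.getD ((lo + hi) / 2) 0 := by omega
          _ ≤ cums.getD j 0 := hmono _ j hj hjlen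
    · rw [if_neg hlt]
      have : lo = hi := by omega
      subst this
      exact ⟨hlow, hhi, fun h => hhigh lo (le_refl _) h⟩

theorem bsearchB_spec (cums : List Int) (start : Int)
    (hmono : ∀ i j, i ≤ j → j < cums.length → cums.getD i 0 ≤ cums.getD j 0)
    (lo hi : Nat) :
    lo ≤ hi → hi ≤ cums.length →
    (∀ j, j < lo → cums.getD j 0 < start) →
    (∀ j, hi ≤ j → j < cums.length → start ≤ cums.getD j 0) →
    (∀ j, j < bsearchB cums start lo hi → cums.getD j 0 < start) ∧
      bsearchB cums start lo hi ≤ cums.length ∧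
      (bsearchB cums start lo hi < cums.length → start ≤ cums.getD (bsearchB cums start lo hi) 0) :=
  fun hle hhi => bsearchGo_spec cums start hmono (hi - lo) lo hi (le_refl _) hle hhi

-- ===== VERDICT (by name: the statement is the Claim_ definition above) =====
theorem full_answer_spec : Claim_equal_full_answer := by
  intro question context base _ _
  unfold Spec_full_answer full_answer full_answer_alt
  cases hget : (PySem.Dict.ofList base).get? "start" with
  | none => rfl
  | some start =>
    simp only [cumsB_eq]
    set parts := (PySem.Str.split? context ".").getD [] with hparts
    have hlen : (cumsFrom 0 parts).length = parts.length := length_cumsFrom parts 0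
    have hmono := mono_of_pairwise _ (pairwise_cumsFrom parts 0)
    obtain ⟨h1, -, h3⟩ := bsearchB_spec (cumsFrom 0 parts) start hmono 0 parts.length
      (Nat.zero_le _) (by omega) (by omega) (by omega)
    rw [loopA_char]
    rw [findPart_eq start parts (cumsFrom 0 parts) (bsearchB (cumsFrom 0 parts) start 0 parts.length)
      hlen.symm h1 (fun h => h3 (by omega))]
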